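-- pv_equiv track=rewrite | github.com/silverscorpio/coding_sites | hackerrank/other_problems/dominant_cells_in_grid.py | dominant_cells
-- ===== SOURCE A (Python) =====
-- from typing import List, Dict
--
-- def get_neighbours(grid_rows: int, grid_cols: int) -> Dict:
--     neighbours = {}
--     for row in range(grid_rows):
--         for col in range(grid_cols):
--             pairs = []
--             for i in range(row - 1, row + 2):
--                 for j in range(col - 1, col + 2):
--                     if (i, j) != (row, col) and ((-1 < i < grid_rows) and (-1 < j < grid_cols)):
--                         pairs.append((i, j))
--             neighbours[(row, col)] = pairs
--
--     return neighbours
--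
-- def dominant_cells(grid: List[List]) -> int:
--     num_dominant_cells = 0
--     grid_neighbours = get_neighbours(len(grid), len(grid[0]))
--     for cell, cell_neighbours in grid_neighbours.items():
--         dominance_check = [grid[cell[0]][cell[1]] > grid[i[0]][i[1]] for i in cell_neighbours]
--         if all(dominance_check):
--             num_dominant_cells += 1
--     return num_dominant_cells
-- ===== SOURCE B (Python) =====
-- def dominant_cells(grid):
--     # one fused pass over the grid: no precomputed neighbour table, no per-cell list
--     rows = len(grid)
--     cols = len(grid[0])
--     count = 0
--     for r in range(rows):
--         for c in range(cols):
--             if all(grid[r][c] > grid[i][j]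
--                    for i in (r - 1, r, r + 1)
--                    for j in (c - 1, c, c + 1)
--                    if (i, j) != (r, c) and -1 < i < rows and -1 < j < cols):
--                 count += 1
--     return count
-- ===== Notes on version B (the rewrite author's own statement) =====
-- stated objective: simpler
-- what changed: A precomputes a full dict mapping every cell to its list of in-bounds neighbours and then iterates the dict building a per-cell boolean list; B drops the table and the intermediate lists entirely and counts in one fused pass, checking each cell's in-bounds neighbours directly with a short-circuiting all().
import Mathlib
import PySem

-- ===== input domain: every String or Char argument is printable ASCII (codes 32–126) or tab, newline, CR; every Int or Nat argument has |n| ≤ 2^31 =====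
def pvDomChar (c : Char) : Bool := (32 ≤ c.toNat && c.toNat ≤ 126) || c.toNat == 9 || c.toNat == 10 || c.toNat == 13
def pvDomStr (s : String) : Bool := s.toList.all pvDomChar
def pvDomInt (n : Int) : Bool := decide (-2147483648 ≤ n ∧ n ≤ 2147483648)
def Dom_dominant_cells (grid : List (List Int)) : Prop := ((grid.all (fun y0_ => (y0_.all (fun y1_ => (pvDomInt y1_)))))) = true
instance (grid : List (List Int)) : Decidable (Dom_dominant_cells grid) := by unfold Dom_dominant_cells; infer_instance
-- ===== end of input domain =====

-- B replaces A's precomputed neighbour table (dict of per-cell neighbour lists) by one fused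
-- counting pass over the grid; same return value on every grid A accepts (objective: simpler).


-- ===== PORT A =====
def get_neighbours (grid_rows grid_cols : Int) : PySem.Dict (Int × Int) (List (Int × Int)) :=
  (PySem.List.pyRange 0 grid_rows).foldl (fun neighbours row =>
    (PySem.List.pyRange 0 grid_cols).foldl (fun neighbours col =>
      let pairs : List (Int × Int) :=
        (PySem.List.pyRange (row - 1) (row + 2)).foldl (fun pairs i =>
          (PySem.List.pyRange (col - 1) (col + 2)).foldl (fun pairs j =>
            if ((i, j) != (row, col) && (decide (-1 < i) && decide (i < grid_rows))
                 && (decide (-1 < j) && decide (j < grid_cols))) = true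
            then pairs ++ [(i, j)] else pairs) pairs) []
      neighbours.insert (row, col) pairs) neighbours) PySem.Dict.empty

def dominant_cells (grid : List (List Int)) : Int :=
  let grid_neighbours :=
    get_neighbours (grid.length : Int) ((PySem.List.pyGetD grid 0 []).length : Int)
  grid_neighbours.items.foldl (fun num_dominant_cells cp =>
    let dominance_check : List Bool := cp.2.map (fun i =>
      decide (PySem.List.pyGetD (PySem.List.pyGetD grid cp.1.1 []) cp.1.2 0 >
              PySem.List.pyGetD (PySem.List.pyGetD grid i.1 []) i.2 0))
    if dominance_check.all id = true then num_dominant_cells + 1 else num_dominant_cells) 0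

-- ===== PORT B =====
def dominant_cells_alt (grid : List (List Int)) : Int :=
  let rows : Int := grid.length
  let cols : Int := (PySem.List.pyGetD grid 0 []).length
  (PySem.List.pyRange 0 rows).foldl (fun count r =>
    (PySem.List.pyRange 0 cols).foldl (fun count c =>
      if ([r - 1, r, r + 1].all (fun i =>
            [c - 1, c, c + 1].all (fun j =>
              if ((i, j) != (r, c) && (decide (-1 < i) && decide (i < rows))
                   && (decide (-1 < j) && decide (j < cols))) = true
              then decide (PySem.List.pyGetD (PySem.List.pyGetD grid r []) c 0 >
                           PySem.List.pyGetD (PySem.List.pyGetD grid i []) j 0)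
              else true))) = true
      then count + 1 else count) count) 0

-- ===== PRECONDITION & SPEC =====
-- A raises IndexError on the empty grid (len(grid[0])) and on grids with a row shorter than
-- len(grid[0]); Pre_ excludes exactly those, i.e. exactly the inputs where A returns no value.
def Pre_dominant_cells (grid : List (List Int)) : Prop :=
  grid ≠ [] ∧ ∀ row ∈ grid, (PySem.List.pyGetD grid 0 []).length ≤ row.length
instance (grid : List (List Int)) : Decidable (Pre_dominant_cells grid) := by
  unfold Pre_dominant_cells; infer_instance
def pvWitness_dominant_cells : List (List Int) := [[1, 2], [3, 4]]

def Spec_dominant_cells (grid : List (List Int)) (out : Int) : Prop := out = dominant_cells_alt grid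
instance (grid : List (List Int)) (out : Int) : Decidable (Spec_dominant_cells grid out) := by
  unfold Spec_dominant_cells; infer_instance

-- ===== CLAIM (what is proved, stated in full; the proofs are below) =====
def Claim_equal_dominant_cells : Prop := ∀ (grid : List (List Int)), Dom_dominant_cells grid → Pre_dominant_cells grid → Spec_dominant_cells grid (dominant_cells grid)

-- ===== LEMMAS AND PROOFS =====

-- range(a-1, a+2) is the three values a-1, a, a+1
theorem pyRange_triple (a : Int) : PySem.List.pyRange (a - 1) (a + 2) = [a - 1, a, a + 1] := by
  rw [PySem.List.pyRange_one_cons (by omega), show a - 1 + 1 = a from by ring,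
      PySem.List.pyRange_one_cons (by omega), PySem.List.pyRange_one_cons (by omega),
      show a + 1 + 1 = a + 2 from by ring]
  simp [PySem.List.pyRange]

-- the neighbour-offset condition of both programs, abstracted
def nbCond (rows cols r c : Int) (i j : Int) : Bool :=
  (i, j) != (r, c) && (decide (-1 < i) && decide (i < rows)) && (decide (-1 < j) && decide (j < cols))

-- A's per-cell `pairs` list in closed form
theorem pairs_eq (rows cols r c : Int) :
    (PySem.List.pyRange (r - 1) (r + 2)).foldl (fun pairs i =>
      (PySem.List.pyRange (c - 1) (c + 2)).foldl (fun pairs j =>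
        if ((i, j) != (r, c) && (decide (-1 < i) && decide (i < rows))
             && (decide (-1 < j) && decide (j < cols))) = true
        then pairs ++ [(i, j)] else pairs) pairs) ([] : List (Int × Int)) =
    [r - 1, r, r + 1].flatMap (fun i =>
      (([c - 1, c, c + 1].filter (nbCond rows cols r c i)).map (fun j => (i, j)))) := by
  rw [pyRange_triple r]
  have hinner : ∀ (i : Int) (acc : List (Int × Int)),
      (PySem.List.pyRange (c - 1) (c + 2)).foldl (fun pairs j =>
        if ((i, j) != (r, c) && (decide (-1 < i) && decide (i < rows))
             && (decide (-1 < j) && decide (j < cols))) = true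
        then pairs ++ [(i, j)] else pairs) acc =
      acc ++ (([c - 1, c, c + 1].filter (nbCond rows cols r c i)).map (fun j => (i, j))) := by
    intro i acc
    rw [pyRange_triple c]
    exact PySem.List.foldl_append_if (nbCond rows cols r c i) (fun j => (i, j)) _ acc
  calc ([r - 1, r, r + 1].foldl (fun pairs i =>
          (PySem.List.pyRange (c - 1) (c + 2)).foldl (fun pairs j =>
            if ((i, j) != (r, c) && (decide (-1 < i) && decide (i < rows))
                 && (decide (-1 < j) && decide (j < cols))) = true
            then pairs ++ [(i, j)] else pairs) pairs) ([] : List (Int × Int)))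
      = [r - 1, r, r + 1].foldl (fun pairs i =>
          pairs ++ (([c - 1, c, c + 1].filter (nbCond rows cols r c i)).map (fun j => (i, j))))
          ([] : List (Int × Int)) := by
        exact PySem.List.foldl_congr_mem _ _ _ _ (fun acc x _ => hinner x acc)
    _ = [] ++ [r - 1, r, r + 1].flatMap (fun i =>
          (([c - 1, c, c + 1].filter (nbCond rows cols r c i)).map (fun j => (i, j)))) :=
        PySem.List.foldl_append_eq_flatMap _ _ _
    _ = _ := by simp

-- a nodup nested insert loop over fresh distinct keys appends all its items
theorem items_nested_insert (cl : List Int) (g : Int → Int → List (Int × Int))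
    (rs : List Int) (hrs : rs.Nodup) (hcl : cl.Nodup) (d : PySem.Dict (Int × Int) (List (Int × Int)))
    (hfresh : ∀ p ∈ d.items, p.1.1 ∉ rs) :
    (rs.foldl (fun d row => cl.foldl (fun d col => d.insert (row, col) (g row col)) d) d).items =
    d.items ++ rs.flatMap (fun row => cl.map (fun col => ((row, col), g row col))) := by
  induction rs generalizing d with
  | nil => simp
  | cons row rs ih =>
    simp only [List.foldl_cons, List.flatMap_cons]
    have hnotin : ∀ p ∈ d.items, p.1.1 ≠ row := by
      intro p hp; exact fun h => (hfresh p hp) (h ▸ List.mem_cons_self)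
    have hcontains : ∀ col ∈ cl, d.contains (row, col) = false := by
      intro col _
      by_contra h
      have h' : d.contains (row, col) = true := by
        cases hc : d.contains (row, col) with
        | false => exact absurd hc h
        | true => rfl
      simp only [PySem.Dict.contains, List.any_eq_true] at h'
      obtain ⟨p, hp, hpe⟩ := h'
      have : p.1 = (row, col) := by simpa using hpe
      exact hnotin p hp (by rw [this])
    have hknd : (cl.map (fun col => ((row, col) : Int × Int))).Nodup :=
      hcl.map (fun a b h => by simpa using h)
    have hitems := PySem.Dict.items_foldl_insert_fresh cl
      (fun col => ((row, col) : Int × Int)) (g row) d hcontains hknd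
    rw [ih (List.Nodup.of_cons hrs) _ ?_]
    · rw [hitems]; simp [List.append_assoc]
    · intro p hp
      rw [hitems] at hp
      rcases List.mem_append.mp hp with h | h
      · exact fun hm => hfresh p h (List.mem_cons_of_mem _ hm)
      · obtain ⟨col, _, rfl⟩ := List.mem_map.mp h
        simpa using (List.nodup_cons.mp hrs).1

-- items of A's neighbour dict, in row-major order
theorem items_get_neighbours (rows cols : Int) :
    (get_neighbours rows cols).items =
    (PySem.List.pyRange 0 rows).flatMap (fun row =>
      (PySem.List.pyRange 0 cols).map (fun col => ((row, col),
        [row - 1, row, row + 1].flatMap (fun i =>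
          (([col - 1, col, col + 1].filter (nbCond rows cols row col i)).map (fun j => (i, j))))))) := by
  have hnodup : ∀ b : Int, (PySem.List.pyRange 0 b).Nodup := by
    intro b
    by_cases h : b ≤ 0
    · have : PySem.List.pyRange 0 b = [] := by simp [PySem.List.pyRange, h]
      rw [this]; exact List.nodup_nil
    · replace h : 0 < b := by omega
      obtain ⟨n, rfl⟩ : ∃ n : Nat, b = (n : Int) := ⟨b.toNat, (Int.toNat_of_nonneg h.le).symm⟩
      rw [PySem.List.pyRange_zero_natCast]
      exact (List.nodup_range).map (fun a b h => by exact_mod_cast h)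
  unfold get_neighbours
  have := items_nested_insert (PySem.List.pyRange 0 cols)
    (fun row col => [row - 1, row, row + 1].flatMap (fun i =>
      (([col - 1, col, col + 1].filter (nbCond rows cols row col i)).map (fun j => (i, j)))))
    (PySem.List.pyRange 0 rows) (hnodup rows) (hnodup cols) PySem.Dict.empty (by simp [PySem.Dict.empty])
  rw [show ((PySem.List.pyRange 0 rows).foldl (fun neighbours row =>
      (PySem.List.pyRange 0 cols).foldl (fun neighbours col =>
        let pairs : List (Int × Int) :=
          (PySem.List.pyRange (row - 1) (row + 2)).foldl (fun pairs i =>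
            (PySem.List.pyRange (col - 1) (col + 2)).foldl (fun pairs j =>
              if ((i, j) != (row, col) && (decide (-1 < i) && decide (i < rows))
                   && (decide (-1 < j) && decide (j < cols))) = true
              then pairs ++ [(i, j)] else pairs) pairs) []
        neighbours.insert (row, col) pairs) neighbours) PySem.Dict.empty) =
    ((PySem.List.pyRange 0 rows).foldl (fun d row =>
      (PySem.List.pyRange 0 cols).foldl (fun d col =>
        d.insert (row, col) ([row - 1, row, row + 1].flatMap (fun i =>
          (([col - 1, col, col + 1].filter (nbCond rows cols row col i)).map (fun j => (i, j)))))) d)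
      PySem.Dict.empty) from by
    apply PySem.List.foldl_congr_mem; intro d row _
    apply PySem.List.foldl_congr_mem; intro d col _
    show d.insert (row, col) _ = _
    rw [pairs_eq rows cols row col]]
  rw [this]
  simp [PySem.Dict.empty]

-- B's if-guarded check equals A's all-over-filtered-list check, per cell
theorem check_eq (grid : List (List Int)) (rows cols r c : Int) :
    (([r - 1, r, r + 1].flatMap (fun i =>
        (([c - 1, c, c + 1].filter (nbCond rows cols r c i)).map (fun j => (i, j))))).map
      (fun i => decide (PySem.List.pyGetD (PySem.List.pyGetD grid r []) c 0 >
                        PySem.List.pyGetD (PySem.List.pyGetD grid i.1 []) i.2 0))).all id =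
    [r - 1, r, r + 1].all (fun i =>
      [c - 1, c, c + 1].all (fun j =>
        if (nbCond rows cols r c i j) = true
        then decide (PySem.List.pyGetD (PySem.List.pyGetD grid r []) c 0 >
                     PySem.List.pyGetD (PySem.List.pyGetD grid i []) j 0)
        else true)) := by
  rw [List.all_map, List.all_flatMap]
  refine List.all_congr rfl (fun i => ?_)
  rw [List.all_map, List.all_filter]
  refine List.all_congr rfl (fun j => ?_)
  by_cases h : nbCond rows cols r c i j = true <;> simp [h]

-- ===== VERDICT (by name: the statement is the Claim_ definition above) =====
theorem dominant_cells_spec : Claim_equal_dominant_cells := by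
  intro grid _ _
  show dominant_cells grid = dominant_cells_alt grid
  simp only [dominant_cells, dominant_cells_alt]
  rw [items_get_neighbours]
  rw [List.foldl_flatMap]
  apply PySem.List.foldl_congr_mem
  intro acc row _
  rw [List.foldl_map]
  apply PySem.List.foldl_congr_mem
  intro acc col _
  show (if _ = true then acc + 1 else acc) = (if _ = true then acc + 1 else acc)
  rw [check_eq grid (grid.length : Int) ((PySem.List.pyGetD grid 0 []).length : Int) row col]
  simp only [nbCond]
  rfl
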